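-- pv_equiv track=rewrite | github.com/lucasfagan/Fake-Surfaces | fakesurfaces_cluster_cla_6.py | are_same_with_ordering
-- ===== SOURCE A (Python) =====
-- from collections import Counter
--
-- def are_compatible(disk1, disk2, d):
--     starting_d = d.copy()
--     valid_dicts = []
--     l = len(disk1)
--     for shift_amount in range(l):
--         for sgn in [-1,1]:
--             d = starting_d.copy()
--             for i in range(len(disk1)):
--                 # check: does a key map to the wrong value or is a value already mapped to by a different key?
--                 if disk1[i] in d.keys() and d[disk1[i]] != disk2[(shift_amount+sgn*i) % len(disk1)]:
--                     break
--                 if disk2[(shift_amount+sgn*i) % len(disk1)] in d.values() and disk1[i] != list(d.keys())[list(d.values()).index(disk2[(shift_amount+sgn*i) % len(disk1)])]: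
--                     break
--                 d[disk1[i]] = disk2[(shift_amount+i*sgn) % len(disk1)]
--             else:
--                 valid_dicts.append(d)
--     return valid_dicts
--
-- def are_same_with_ordering(surface1,surface2):
--     for disk_num, disk in enumerate(surface1):
--         if len(Counter(disk)) != len(Counter(surface2[disk_num])):
--             return False
--     # now try to transform disk1 into disk2
--     transform_dicts = [{}]
--     for disk_num in range(len(surface1)): #iterate through disks
--         new_transform_dicts = []
--         for transform_dict in transform_dicts:
--             disk1 = surface1[disk_num]
--             disk1_neg = tuple([-1*x for x in disk1])
--             disk2 = surface2[disk_num]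
--             disk2_neg = tuple([-1*x for x in disk2])
--             temp_dicts = are_compatible(disk1, disk2, transform_dict)
--             if temp_dicts:
--                 new_transform_dicts.extend(temp_dicts)
--             temp_dicts = are_compatible(disk1, disk2_neg, transform_dict)
--             if temp_dicts:
--                 new_transform_dicts.extend(temp_dicts)
--             temp_dicts = are_compatible(disk1_neg, disk2, transform_dict)
--             if temp_dicts:
--                 new_transform_dicts.extend(temp_dicts)
--             temp_dicts = are_compatible(disk1_neg, disk2_neg, transform_dict)
--             if temp_dicts:
--                 new_transform_dicts.extend(temp_dicts)
--         transform_dicts = new_transform_dicts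
--     if len(transform_dicts) == 0:
--         return False
--     return True
-- ===== SOURCE B (Python) =====
-- def are_same_with_ordering(surface1, surface2):
--     # disks must have the same number of distinct labels
--     if any(len(set(d1)) != len(set(d2)) for d1, d2 in zip(surface1, surface2)):
--         return False
--
--     def extend(a, b, fwd, inv, shift, sgn):
--         # try to extend the bijection (fwd, inv) by aligning disk a with disk b
--         # rotated by `shift` in direction `sgn`; inverse dict replaces value scans
--         l = len(a)
--         f = dict(fwd)
--         g = dict(inv)
--         for i in range(l):
--             x = a[i]
--             y = b[(shift + sgn * i) % l]
--             vx = f.get(x)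
--             if vx is not None and vx != y:
--                 return None
--             ky = g.get(y)
--             if ky is not None and ky != x:
--                 return None
--             f[x] = y
--             g[y] = x
--         return f, g
--
--     def dfs(pairs, fwd, inv):
--         # depth-first search with short-circuit on the first success
--         if not pairs:
--             return True
--         (d1, d2), rest = pairs[0], pairs[1:]
--         d1n = [-x for x in d1]
--         d2n = [-x for x in d2]
--         for a, b in ((d1, d2), (d1, d2n), (d1n, d2), (d1n, d2n)):
--             for shift in range(len(a)):
--                 for sgn in (-1, 1):
--                     e = extend(a, b, fwd, inv, shift, sgn)
--                     if e is not None and dfs(rest, e[0], e[1]):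
--                         return True
--         return False
--
--     return dfs(list(zip(surface1, surface2)), {}, {})
-- ===== Notes on version B (the rewrite author's own statement) =====
-- stated objective: faster
-- what changed: B replaces A's breadth-first accumulation of every reachable transform dict and its O(l) list(d.values()).index scans by a depth-first search that short-circuits on the first success and carries a forward/inverse dict pair so every check is an O(1) lookup.
-- outside the precondition, e.g. on are_same_with_ordering([[1, 1, 2, 2], [1, 1]], [[3, 4, 3, 4], [5]]): A returns False, B returns False
import Mathlib
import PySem

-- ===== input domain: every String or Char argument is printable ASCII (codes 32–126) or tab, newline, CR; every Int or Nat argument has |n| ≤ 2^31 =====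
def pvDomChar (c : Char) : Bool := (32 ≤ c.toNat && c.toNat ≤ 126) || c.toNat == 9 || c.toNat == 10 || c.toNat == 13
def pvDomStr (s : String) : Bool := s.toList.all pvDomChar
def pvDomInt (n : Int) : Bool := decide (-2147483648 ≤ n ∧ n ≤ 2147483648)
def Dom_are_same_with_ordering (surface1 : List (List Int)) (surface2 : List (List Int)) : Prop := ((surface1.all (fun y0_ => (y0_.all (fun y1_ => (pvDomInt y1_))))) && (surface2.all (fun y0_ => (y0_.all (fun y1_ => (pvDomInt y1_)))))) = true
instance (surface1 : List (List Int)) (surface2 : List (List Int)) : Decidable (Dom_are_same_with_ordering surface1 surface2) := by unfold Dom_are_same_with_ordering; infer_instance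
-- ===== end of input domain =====

-- B replaces A's breadth-first accumulation of all transform dicts (with O(l) values().index
-- scans) by a short-circuiting depth-first search over a forward/inverse dict pair (O(1) lookups).

-- ===== PORT A =====
-- inner 'for i in range(len(disk1)) … else' loop of are_compatible:
-- some d = loop ran to completion (the 'else' branch appends d), none = break
def pvCompatLoop (disk1 disk2 : List Int) (shift sgn : Int) :
    List Int → PySem.Dict Int Int → Option (PySem.Dict Int Int)
  | [], d => some d
  | i :: rest, d =>
      let key := PySem.List.pyGetD disk1 i 0
      let tgt := PySem.List.pyGetD disk2 (PySem.Int.mod (shift + sgn * i) (disk1.length : Int)) 0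
      if (d.keys).contains key && !(d.getD key 0 == tgt) then none
      else if (d.values).contains tgt &&
              !(key == (match PySem.List.index? d.values tgt with
                        | some j => (d.keys).getD j 0
                        | none => 0)) then none
      else pvCompatLoop disk1 disk2 shift sgn rest (d.insert key tgt)

-- are_compatible(disk1, disk2, d): iterate shift over range(l) and sgn over [-1, 1],
-- appending each completed dict to valid_dicts
def are_compatible (disk1 disk2 : List Int) (d0 : PySem.Dict Int Int) :
    List (PySem.Dict Int Int) :=
  (PySem.List.pyRange 0 (disk1.length : Int) 1).foldl (fun valid shift =>
    [(-1 : Int), 1].foldl (fun valid sgn =>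
      match pvCompatLoop disk1 disk2 shift sgn
              (PySem.List.pyRange 0 (disk1.length : Int) 1) d0 with
      | some d => valid ++ [d]
      | none => valid) valid) []

-- first loop of are_same_with_ordering: early return False on a Counter-size mismatch
def pvCheckCounts (surface2 : List (List Int)) : List (Int × List Int) → Bool
  | [] => true
  | (disk_num, disk) :: rest =>
      if !((PySem.Dict.counter disk).size ==
           (PySem.Dict.counter ((PySem.List.pyGet? surface2 disk_num).getD [])).size)
      then false
      else pvCheckCounts surface2 rest

-- body of 'for disk_num in range(len(surface1))': rebuild transform_dicts
def pvDiskBody (surface1 surface2 : List (List Int))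
    (tds : List (PySem.Dict Int Int)) (disk_num : Int) : List (PySem.Dict Int Int) :=
  tds.foldl (fun ntds td =>
    let disk1 := (PySem.List.pyGet? surface1 disk_num).getD []
    let disk1n := disk1.map (fun x => -1 * x)
    let disk2 := (PySem.List.pyGet? surface2 disk_num).getD []
    let disk2n := disk2.map (fun x => -1 * x)
    let t1 := are_compatible disk1 disk2 td
    let ntds := if !(t1 == []) then ntds ++ t1 else ntds
    let t2 := are_compatible disk1 disk2n td
    let ntds := if !(t2 == []) then ntds ++ t2 else ntds
    let t3 := are_compatible disk1n disk2 td
    let ntds := if !(t3 == []) then ntds ++ t3 else ntds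
    let t4 := are_compatible disk1n disk2n td
    let ntds := if !(t4 == []) then ntds ++ t4 else ntds
    ntds) []

def are_same_with_ordering (surface1 : List (List Int)) (surface2 : List (List Int)) : Bool :=
  if !(pvCheckCounts surface2 (PySem.List.enumerate surface1 0)) then false
  else
    let final := (PySem.List.pyRange 0 (surface1.length : Int) 1).foldl
      (pvDiskBody surface1 surface2) [PySem.Dict.empty]
    if final.length == 0 then false else true

-- ===== PORT B =====
-- extend(a, b, fwd, inv, shift, sgn): extend the bijection or return none; the inverse
-- dict g replaces A's scan of d.values()
def pvExtend (a b : List Int) (shift sgn : Int) :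
    List Int → PySem.Dict Int Int × PySem.Dict Int Int →
    Option (PySem.Dict Int Int × PySem.Dict Int Int)
  | [], fg => some fg
  | i :: rest, fg =>
      let x := PySem.List.pyGetD a i 0
      let y := PySem.List.pyGetD b (PySem.Int.mod (shift + sgn * i) (a.length : Int)) 0
      if (match fg.1.get? x with | some v => !(v == y) | none => false) then none
      else if (match fg.2.get? y with | some k => !(k == x) | none => false) then none
      else pvExtend a b shift sgn rest (fg.1.insert x y, fg.2.insert y x)

-- dfs(pairs, fwd, inv): depth-first, short-circuiting on the first success
def pvDfs : List (List Int × List Int) → PySem.Dict Int Int → PySem.Dict Int Int → Bool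
  | [], _, _ => true
  | (d1, d2) :: rest, f, g =>
      let d1n := d1.map (fun x => -x)
      let d2n := d2.map (fun x => -x)
      [(d1, d2), (d1, d2n), (d1n, d2), (d1n, d2n)].any (fun ab =>
        (PySem.List.pyRange 0 (ab.1.length : Int) 1).any (fun shift =>
          [(-1 : Int), 1].any (fun sgn =>
            match pvExtend ab.1 ab.2 shift sgn
                    (PySem.List.pyRange 0 (ab.1.length : Int) 1) (f, g) with
            | some fg => pvDfs rest fg.1 fg.2
            | none => false)))

def are_same_with_ordering_alt (surface1 : List (List Int)) (surface2 : List (List Int)) : Bool :=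
  if (surface1.zip surface2).any (fun p =>
       !((PySem.Set.ofList p.1).length == (PySem.Set.ofList p.2).length)) then false
  else pvDfs (surface1.zip surface2) PySem.Dict.empty PySem.Dict.empty

-- ===== PRECONDITION & SPEC =====
-- Pre_ excludes inputs on which surface2 is shorter than surface1 (fewer disks, or a
-- shorter disk at some position) while no distinct-count mismatch stops the scan first:
-- there A normally raises IndexError, and whether it instead still returns depends on
-- the run of the search, not on a closed-form property of the input.
def Pre_are_same_with_ordering (surface1 : List (List Int)) (surface2 : List (List Int)) : Prop :=
  ((surface1.zip surface2).any (fun p =>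
      !((PySem.Set.ofList p.1).length == (PySem.Set.ofList p.2).length)) = true)
  ∨ (surface1.length ≤ surface2.length ∧
     ((surface1.zip surface2).all (fun p => decide (p.1.length ≤ p.2.length)) = true))
instance (surface1 : List (List Int)) (surface2 : List (List Int)) :
    Decidable (Pre_are_same_with_ordering surface1 surface2) := by
  unfold Pre_are_same_with_ordering; infer_instance

def pvWitness_are_same_with_ordering : List (List Int) × List (List Int) :=
  ([[1, 2, 3]], [[5, 7, 6]])

def Spec_are_same_with_ordering (surface1 : List (List Int)) (surface2 : List (List Int)) (out : Bool) : Prop := out = are_same_with_ordering_alt surface1 surface2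
instance (surface1 : List (List Int)) (surface2 : List (List Int)) (out : Bool) : Decidable (Spec_are_same_with_ordering surface1 surface2 out) := by unfold Spec_are_same_with_ordering; infer_instance

-- ===== CLAIM (what is proved, stated in full; the proofs are below) =====
def Claim_equal_are_same_with_ordering : Prop := ∀ (surface1 : List (List Int)) (surface2 : List (List Int)), Dom_are_same_with_ordering surface1 surface2 → Pre_are_same_with_ordering surface1 surface2 → Spec_are_same_with_ordering surface1 surface2 (are_same_with_ordering surface1 surface2)

-- ===== LEMMAS AND PROOFS =====

def pvInv (d : PySem.Dict Int Int) : PySem.Dict Int Int :=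
  PySem.Dict.mk (d.items.map (fun p => (p.2, p.1)))

def pvRel (d : PySem.Dict Int Int) : Prop := d.keys.Nodup ∧ d.values.Nodup

theorem pv_get?_swap (items : List (Int × Int)) (y : Int) :
    (PySem.Dict.mk (items.map (fun p => (p.2, p.1)))).get? y
      = (PySem.List.index? (items.map Prod.snd) y).map
          (fun j => (items.map Prod.fst).getD j 0) := by
  induction items with
  | nil => simp [PySem.Dict.get?, PySem.List.index?]
  | cons p rest ih =>
    simp only [List.map_cons]
    rw [PySem.Dict.get?_mk_cons]
    by_cases h : p.2 = y
    · subst h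
      rw [PySem.List.index?_cons_self]
      simp
    · rw [PySem.List.index?_cons_of_ne _ h, ih]
      simp only [beq_iff_eq, h, if_false]
      cases hx : PySem.List.index? (rest.map Prod.snd) y <;> simp

theorem pv_keys_eq (d : PySem.Dict Int Int) : d.keys = d.items.map Prod.fst := rfl
theorem pv_values_eq (d : PySem.Dict Int Int) : d.values = d.items.map Prod.snd := rfl

theorem pv_insert_inv (d : PySem.Dict Int Int) (x y : Int)
    (hrel : pvRel d)
    (h1 : (d.keys).contains x = true → d.getD x 0 = y)
    (h2 : ∀ j, PySem.List.index? d.values y = some j → (d.keys).getD j 0 = x) :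
    pvInv (d.insert x y) = (pvInv d).insert y x ∧ pvRel (d.insert x y) := by
  obtain ⟨hnk, hnv⟩ := hrel
  cases hg : d.get? x with
  | some v =>
    have hck : (d.keys).contains x = true := by
      simp only [List.contains_iff_mem]
      have := PySem.Dict.get?_eq_none_iff_not_mem_keys d x
      by_contra hx
      exact absurd hg (by rw [this.2 hx]; simp)
    have hv : v = y := by
      have := h1 hck
      rw [PySem.Dict.getD_eq_get?_getD, hg] at this
      simpa using this
    rw [hv] at hg
    have hcd : d.contains x = true := by
      rw [PySem.Dict.contains_eq_isSome_get?, hg]; rfl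
    have hmem : (x, y) ∈ d.items := PySem.Dict.mem_items_of_get?_eq_some d hg
    have items_eq : (d.insert x y).items = d.items := by
      rw [PySem.Dict.items_insert_of_contains d y hcd]
      conv_rhs => rw [← List.map_id d.items]
      apply List.map_congr_left
      intro p hp
      by_cases hpx : p.1 = x
      · have : d.get? p.1 = some p.2 := PySem.Dict.get?_of_mem_items d hp hnk
        rw [hpx, hg] at this
        have h2y : p.2 = y := by simpa using this.symm
        simp only [hpx, beq_self_eq_true, if_true, id_eq]
        rw [← hpx, ← h2y]
      · simp [hpx]
    have hinv_eq : (pvInv d).insert y x = pvInv d := by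
      have hy_mem : y ∈ d.items.map Prod.snd := List.mem_map_of_mem hmem
      have hgy : (pvInv d).get? y = some x := by
        rw [pvInv, pv_get?_swap]
        obtain ⟨j, hj⟩ := Option.isSome_iff_exists.mp ((PySem.List.index?_isSome_iff (d.items.map Prod.snd) y).2 hy_mem)
        rw [hj]
        have := h2 j (by rw [pv_values_eq]; exact hj)
        rw [pv_keys_eq] at this
        simpa using this
      have hcy : (pvInv d).contains y = true := by
        rw [PySem.Dict.contains_eq_isSome_get?, hgy]; rfl
      apply PySem.Dict.ext
      rw [PySem.Dict.items_insert_of_contains _ x hcy]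
      conv_rhs => rw [← List.map_id (pvInv d).items]
      apply List.map_congr_left
      intro q hq
      by_cases hqy : q.1 = y
      · have hq' : q ∈ d.items.map (fun p => (p.2, p.1)) := hq
        obtain ⟨p, hp, hpq⟩ := List.mem_map.mp hq'
        have hp2 : p.2 = y := by rw [← hpq] at hqy; exact hqy
        have : p = (x, y) := List.inj_on_of_nodup_map hnv hp hmem (by simpa using hp2)
        rw [← hpq, this]
        simp
      · simp [hqy]
    constructor
    · show PySem.Dict.mk ((d.insert x y).items.map (fun p => (p.2, p.1))) = _
      rw [items_eq, hinv_eq]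
      rfl
    · constructor
      · rw [pv_keys_eq, items_eq]; exact hnk
      · rw [pv_values_eq, items_eq]; exact hnv
  | none =>
    have hxk : x ∉ d.keys := (PySem.Dict.get?_eq_none_iff_not_mem_keys d x).1 hg
    have hcd : d.contains x = false := by
      rw [PySem.Dict.contains_eq_isSome_get?, hg]; rfl
    have hyv : y ∉ d.values := by
      intro hy
      obtain ⟨j, hj⟩ := Option.isSome_iff_exists.mp ((PySem.List.index?_isSome_iff d.values y).2 hy)
      have hx := h2 j hj
      obtain ⟨hjlt, -, -⟩ := PySem.List.getElem_of_index?_eq_some hj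
      have hjk : j < d.keys.length := by
        rw [pv_keys_eq, List.length_map]
        rw [pv_values_eq, List.length_map] at hjlt
        exact hjlt
      rw [List.getD_eq_getElem _ _ hjk] at hx
      exact hxk (hx ▸ List.getElem_mem hjk)
    have hcy : (pvInv d).contains y = false := by
      rw [PySem.Dict.contains_eq_isSome_get?, pvInv, pv_get?_swap]
      rw [← pv_values_eq, (PySem.List.index?_eq_none_iff _ _).2 hyv]
      rfl
    have items_eq : (d.insert x y).items = d.items ++ [(x, y)] :=
      PySem.Dict.items_insert_of_not_contains d y hcd
    constructor
    · apply PySem.Dict.ext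
      rw [PySem.Dict.items_insert_of_not_contains _ x hcy]
      simp [pvInv, items_eq]
    · constructor
      · rw [pv_keys_eq, items_eq]
        simp only [List.map_append, List.map_cons, List.map_nil]
        rw [← pv_keys_eq]
        simp only [List.nodup_append]
        exact ⟨hnk, List.nodup_singleton x, by intro a ha b hb; rw [List.mem_singleton] at hb; subst hb; exact fun h => hxk (h ▸ ha)⟩
      · rw [pv_values_eq, items_eq]
        simp only [List.map_append, List.map_cons, List.map_nil]
        rw [← pv_values_eq]
        simp only [List.nodup_append]
        exact ⟨hnv, List.nodup_singleton y, by intro a ha b hb; rw [List.mem_singleton] at hb; subst hb; exact fun h => hyv (h ▸ ha)⟩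

theorem pv_contains_keys (d : PySem.Dict Int Int) (k : Int) :
    (d.keys).contains k = (d.get? k).isSome := by
  cases hg : d.get? k with
  | none =>
    have := (PySem.Dict.get?_eq_none_iff_not_mem_keys d k).1 hg
    simpa using this
  | some v =>
    have hm : (k, v) ∈ d.items := PySem.Dict.mem_items_of_get?_eq_some d hg
    have : k ∈ d.keys := by
      rw [pv_keys_eq]
      exact List.mem_map_of_mem hm
    simpa using this

theorem pv_loop_rel (disk1 disk2 : List Int) (shift sgn : Int) :
    ∀ (idxs : List Int) (d : PySem.Dict Int Int), pvRel d →
      pvExtend disk1 disk2 shift sgn idxs (d, pvInv d)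
        = (pvCompatLoop disk1 disk2 shift sgn idxs d).map (fun d' => (d', pvInv d'))
      ∧ ∀ d', pvCompatLoop disk1 disk2 shift sgn idxs d = some d' → pvRel d' := by
  intro idxs
  induction idxs with
  | nil =>
    intro d hd
    constructor
    · simp [pvExtend, pvCompatLoop]
    · intro d' h
      simp only [pvCompatLoop] at h
      exact (Option.some_inj.mp h) ▸ hd
  | cons i rest ih =>
    intro d hd
    simp only [pvExtend, pvCompatLoop]
    set key := PySem.List.pyGetD disk1 i 0 with hkey
    set tgt := PySem.List.pyGetD disk2 (PySem.Int.mod (shift + sgn * i) (disk1.length : Int)) 0 with htgt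
    -- condition 1 agrees
    have hcond1 : (match d.get? key with | some v => !(v == tgt) | none => false)
        = ((d.keys).contains key && !(d.getD key 0 == tgt)) := by
      cases hg : d.get? key with
      | none =>
        have hk : key ∉ d.keys := (PySem.Dict.get?_eq_none_iff_not_mem_keys d key).1 hg
        simp [hk]
      | some v =>
        rw [pv_contains_keys, hg, PySem.Dict.getD_eq_get?_getD, hg]
        simp
    -- condition 2 agrees
    have hg2 : (pvInv d).get? tgt
        = (PySem.List.index? d.values tgt).map (fun j => (d.keys).getD j 0) := by
      rw [pvInv, pv_get?_swap, ← pv_values_eq, ← pv_keys_eq]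
    have hcond2 : (match (pvInv d).get? tgt with | some k => !(k == key) | none => false)
        = ((d.values).contains tgt &&
           !(key == (match PySem.List.index? d.values tgt with
                     | some j => (d.keys).getD j 0
                     | none => 0))) := by
      cases hix : PySem.List.index? d.values tgt with
      | none =>
        have : tgt ∉ d.values := (PySem.List.index?_eq_none_iff _ _).1 hix
        rw [hg2, hix]
        simp [this]
      | some j =>
        have hmem : tgt ∈ d.values := by
          have := PySem.List.index?_isSome_iff d.values tgt
          rw [hix] at this
          exact this.1 rfl
        rw [hg2, hix]
        simp only [Option.map_some]
        simp [hmem, Bool.beq_comm]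
    rw [hcond1, hcond2]
    cases hb1 : ((d.keys).contains key && !(d.getD key 0 == tgt)) with
    | true => simp
    | false =>
      cases hb2 : ((d.values).contains tgt &&
          !(key == (match PySem.List.index? d.values tgt with
                    | some j => (d.keys).getD j 0
                    | none => 0))) with
      | true => simp
      | false =>
        have h1 : (d.keys).contains key = true → d.getD key 0 = tgt := by
          intro hc
          rw [hc] at hb1
          simpa using hb1
        have h2 : ∀ j, PySem.List.index? d.values tgt = some j → (d.keys).getD j 0 = key := by
          intro j hj
          have hmem : tgt ∈ d.values := by
            have := PySem.List.index?_isSome_iff d.values tgt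
            rw [hj] at this
            exact this.1 rfl
          have hct : (d.values).contains tgt = true := by
            simpa using hmem
          rw [hct, hj] at hb2
          simp only [Bool.true_and, Bool.not_eq_false', beq_iff_eq] at hb2
          exact hb2.symm
        obtain ⟨hinv, hrel'⟩ := pv_insert_inv d key tgt ⟨hd.1, hd.2⟩ h1 h2
        simp only [Bool.false_eq_true, if_false]
        rw [← hinv]
        exact ih _ hrel'

theorem pv_compat_eq (a b : List Int) (d : PySem.Dict Int Int) :
    are_compatible a b d
      = (PySem.List.pyRange 0 (a.length : Int) 1).flatMap (fun shift =>
          (pvCompatLoop a b shift (-1) (PySem.List.pyRange 0 (a.length : Int) 1) d).toList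
          ++ (pvCompatLoop a b shift 1 (PySem.List.pyRange 0 (a.length : Int) 1) d).toList) := by
  unfold are_compatible
  have hbody : ∀ (valid : List (PySem.Dict Int Int)) (shift : Int),
      [(-1 : Int), 1].foldl (fun valid sgn =>
        match pvCompatLoop a b shift sgn (PySem.List.pyRange 0 (a.length : Int) 1) d with
        | some d => valid ++ [d]
        | none => valid) valid
      = valid ++ ((pvCompatLoop a b shift (-1) (PySem.List.pyRange 0 (a.length : Int) 1) d).toList
          ++ (pvCompatLoop a b shift 1 (PySem.List.pyRange 0 (a.length : Int) 1) d).toList) := by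
    intro valid shift
    simp only [List.foldl_cons, List.foldl_nil]
    cases pvCompatLoop a b shift (-1) (PySem.List.pyRange 0 (a.length : Int) 1) d <;>
      cases pvCompatLoop a b shift 1 (PySem.List.pyRange 0 (a.length : Int) 1) d <;> simp
  calc (PySem.List.pyRange 0 (a.length : Int) 1).foldl (fun valid shift =>
        [(-1 : Int), 1].foldl (fun valid sgn =>
          match pvCompatLoop a b shift sgn (PySem.List.pyRange 0 (a.length : Int) 1) d with
          | some d => valid ++ [d]
          | none => valid) valid) []
      = (PySem.List.pyRange 0 (a.length : Int) 1).foldl (fun valid shift =>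
          valid ++ ((pvCompatLoop a b shift (-1) (PySem.List.pyRange 0 (a.length : Int) 1) d).toList
            ++ (pvCompatLoop a b shift 1 (PySem.List.pyRange 0 (a.length : Int) 1) d).toList)) [] := by
        apply List.foldl_ext
        intro acc x _
        exact hbody acc x
    _ = _ := by rw [PySem.List.foldl_append_eq_flatMap]; simp

theorem pv_compat_rel (a b : List Int) (d : PySem.Dict Int Int) (hd : pvRel d) :
    ∀ d' ∈ are_compatible a b d, pvRel d' := by
  intro d' hmem
  rw [pv_compat_eq] at hmem
  obtain ⟨shift, -, hm⟩ := List.mem_flatMap.mp hmem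
  rcases List.mem_append.mp hm with h | h
  · cases hl : pvCompatLoop a b shift (-1) (PySem.List.pyRange 0 (a.length : Int) 1) d with
    | none => rw [hl] at h; simp at h
    | some e =>
      rw [hl] at h; simp at h
      exact h ▸ (pv_loop_rel a b shift (-1) _ d hd).2 e hl
  · cases hl : pvCompatLoop a b shift 1 (PySem.List.pyRange 0 (a.length : Int) 1) d with
    | none => rw [hl] at h; simp at h
    | some e =>
      rw [hl] at h; simp at h
      exact h ▸ (pv_loop_rel a b shift 1 _ d hd).2 e hl

theorem pv_any_cands (a b : List Int) (d : PySem.Dict Int Int) (hd : pvRel d)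
    (P : PySem.Dict Int Int → PySem.Dict Int Int → Bool) :
    ((PySem.List.pyRange 0 (a.length : Int) 1).any (fun shift =>
      [(-1 : Int), 1].any (fun sgn =>
        match pvExtend a b shift sgn (PySem.List.pyRange 0 (a.length : Int) 1) (d, pvInv d) with
        | some fg => P fg.1 fg.2
        | none => false)))
    = (are_compatible a b d).any (fun d' => P d' (pvInv d')) := by
  rw [pv_compat_eq, List.any_flatMap]
  apply List.any_congr rfl
  intro shift
  have e1 := (pv_loop_rel a b shift (-1) (PySem.List.pyRange 0 (a.length : Int) 1) d hd).1
  have e2 := (pv_loop_rel a b shift 1 (PySem.List.pyRange 0 (a.length : Int) 1) d hd).1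
  simp only [List.any_cons, List.any_nil, e1, e2, List.any_append]
  cases pvCompatLoop a b shift (-1) (PySem.List.pyRange 0 (a.length : Int) 1) d <;>
    cases pvCompatLoop a b shift 1 (PySem.List.pyRange 0 (a.length : Int) 1) d <;> simp

def pvStep4 (d1 d2 : List Int) (td : PySem.Dict Int Int) : List (PySem.Dict Int Int) :=
  are_compatible d1 d2 td
  ++ are_compatible d1 (d2.map (fun x => -1 * x)) td
  ++ are_compatible (d1.map (fun x => -1 * x)) d2 td
  ++ are_compatible (d1.map (fun x => -1 * x)) (d2.map (fun x => -1 * x)) td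

def pvFoldZip : List (List Int × List Int) → List (PySem.Dict Int Int) → List (PySem.Dict Int Int)
  | [], L => L
  | (d1, d2) :: rest, L => pvFoldZip rest (L.flatMap (pvStep4 d1 d2))

theorem pv_append_if {α : Type} [BEq α] (t acc : List α) :
    (if !(t == []) then acc ++ t else acc) = acc ++ t := by
  cases t <;> simp

theorem pv_diskBody_eq (s1 s2 : List (List Int)) (dn : Int) (tds : List (PySem.Dict Int Int)) :
    pvDiskBody s1 s2 tds dn
      = tds.flatMap (pvStep4 ((PySem.List.pyGet? s1 dn).getD []) ((PySem.List.pyGet? s2 dn).getD [])) := by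
  unfold pvDiskBody
  have : ∀ (ntds : List (PySem.Dict Int Int)) (td : PySem.Dict Int Int),
      (fun ntds td =>
        let disk1 := (PySem.List.pyGet? s1 dn).getD []
        let disk1n := disk1.map (fun x => -1 * x)
        let disk2 := (PySem.List.pyGet? s2 dn).getD []
        let disk2n := disk2.map (fun x => -1 * x)
        let t1 := are_compatible disk1 disk2 td
        let ntds := if !(t1 == []) then ntds ++ t1 else ntds
        let t2 := are_compatible disk1 disk2n td
        let ntds := if !(t2 == []) then ntds ++ t2 else ntds
        let t3 := are_compatible disk1n disk2 td
        let ntds := if !(t3 == []) then ntds ++ t3 else ntds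
        let t4 := are_compatible disk1n disk2n td
        if !(t4 == []) then ntds ++ t4 else ntds) ntds td
      = ntds ++ pvStep4 ((PySem.List.pyGet? s1 dn).getD []) ((PySem.List.pyGet? s2 dn).getD []) td := by
    intro ntds td
    simp only [pv_append_if]
    simp [pvStep4, List.append_assoc]
  calc tds.foldl _ []
      = tds.foldl (fun ntds td => ntds ++ pvStep4 ((PySem.List.pyGet? s1 dn).getD [])
          ((PySem.List.pyGet? s2 dn).getD []) td) [] := by
        apply List.foldl_ext
        intro acc x _
        exact this acc x
    _ = _ := by rw [PySem.List.foldl_append_eq_flatMap]; simp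

theorem pv_fold_eq_zip (s1 s2 : List (List Int)) (h : s1.length ≤ s2.length) :
    ∀ (n k : Nat) (L : List (PySem.Dict Int Int)), k + n = s1.length →
    (PySem.List.pyRange (k : Int) (s1.length : Int) 1).foldl (pvDiskBody s1 s2) L
      = pvFoldZip ((s1.drop k).zip (s2.drop k)) L := by
  intro n
  induction n with
  | zero =>
    intro k L hk
    rw [PySem.List.pyRange_one_eq_nil (by omega)]
    rw [List.drop_eq_nil_of_le (by omega)]
    simp [pvFoldZip]
  | succ m ih =>
    intro k L hk
    have hk1 : k < s1.length := by omega
    have hk2 : k < s2.length := by omega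
    rw [PySem.List.pyRange_one_cons (by exact_mod_cast hk1)]
    rw [List.foldl_cons]
    rw [List.drop_eq_getElem_cons hk1, List.drop_eq_getElem_cons hk2]
    rw [List.zip_cons_cons]
    show (PySem.List.pyRange ((k : Int) + 1) (s1.length : Int) 1).foldl (pvDiskBody s1 s2)
        (pvDiskBody s1 s2 L (k : Int)) = _
    have : ((k : Int) + 1) = ((k + 1 : Nat) : Int) := by push_cast; ring
    rw [this, ih (k + 1) _ (by omega)]
    show pvFoldZip _ _ = pvFoldZip _ (L.flatMap (pvStep4 s1[k] s2[k]))
    rw [pv_diskBody_eq]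
    rw [PySem.List.pyGet?_natCast s1 k, PySem.List.pyGet?_natCast s2 k]
    rw [List.getElem?_eq_getElem hk1, List.getElem?_eq_getElem hk2]
    rfl

theorem pv_step4_rel (d1 d2 : List Int) (d : PySem.Dict Int Int) (hd : pvRel d) :
    ∀ d' ∈ pvStep4 d1 d2 d, pvRel d' := by
  intro d' h
  simp only [pvStep4, List.mem_append] at h
  rcases h with ((h | h) | h) | h <;> exact pv_compat_rel _ _ _ hd _ h

theorem pv_any_cands' (a b : List Int) (d : PySem.Dict Int Int) (hd : pvRel d)
    (P : PySem.Dict Int Int → PySem.Dict Int Int → Bool) :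
    ((PySem.List.pyRange 0 (a.length : Int) 1).any (fun shift =>
      ((match pvExtend a b shift (-1) (PySem.List.pyRange 0 (a.length : Int) 1) (d, pvInv d) with
        | some fg => P fg.1 fg.2
        | none => false) ||
       ((match pvExtend a b shift 1 (PySem.List.pyRange 0 (a.length : Int) 1) (d, pvInv d) with
        | some fg => P fg.1 fg.2
        | none => false) || false))))
    = (are_compatible a b d).any (fun d' => P d' (pvInv d')) := by
  rw [← pv_any_cands a b d hd P]
  apply List.any_congr rfl
  intro shift
  simp

theorem pv_dfs_cons (d1 d2 : List Int) (rest : List (List Int × List Int))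
    (d : PySem.Dict Int Int) (hd : pvRel d) :
    pvDfs ((d1, d2) :: rest) d (pvInv d)
      = (pvStep4 d1 d2 d).any (fun d' => pvDfs rest d' (pvInv d')) := by
  rw [pvDfs]
  have hneg : (fun x : Int => -x) = (fun x : Int => -1 * x) := by funext x; ring
  rw [hneg]
  simp only [List.any_cons, List.any_nil]
  rw [pv_any_cands' d1 d2 d hd (fun a b => pvDfs rest a b),
      pv_any_cands' d1 (d2.map fun x => -1 * x) d hd (fun a b => pvDfs rest a b),
      pv_any_cands' (d1.map fun x => -1 * x) d2 d hd (fun a b => pvDfs rest a b),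
      pv_any_cands' (d1.map fun x => -1 * x) (d2.map fun x => -1 * x) d hd (fun a b => pvDfs rest a b)]
  simp [pvStep4, List.any_append]

theorem pv_phase2 : ∀ (pairs : List (List Int × List Int)) (L : List (PySem.Dict Int Int)),
    (∀ d ∈ L, pvRel d) →
    ((pvFoldZip pairs L ≠ []) ↔ L.any (fun d => pvDfs pairs d (pvInv d)) = true) := by
  intro pairs
  induction pairs with
  | nil =>
    intro L hL
    show L ≠ [] ↔ _
    simp only [pvDfs]
    cases L <;> simp
  | cons p rest ih =>
    obtain ⟨d1, d2⟩ := p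
    intro L hL
    show pvFoldZip rest (L.flatMap (pvStep4 d1 d2)) ≠ [] ↔ _
    rw [ih (L.flatMap (pvStep4 d1 d2)) (by
      intro d' hd'
      obtain ⟨d, hdL, hmem⟩ := List.mem_flatMap.mp hd'
      exact pv_step4_rel d1 d2 d (hL d hdL) d' hmem)]
    rw [List.any_flatMap]
    simp only [List.any_eq_true]
    constructor
    · rintro ⟨d, hdL, hin⟩
      exact ⟨d, hdL, by
        rw [pv_dfs_cons d1 d2 rest d (hL d hdL)]
        exact List.any_eq_true.mpr hin⟩
    · rintro ⟨d, hdL, hany⟩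
      refine ⟨d, hdL, List.any_eq_true.mp ?_⟩
      rw [← pv_dfs_cons d1 d2 rest d (hL d hdL)]
      exact hany

theorem pv_counter_size (xs : List Int) :
    (PySem.Dict.counter xs).size = (PySem.Set.ofList xs).length := by
  show (PySem.Dict.counter xs).items.length = _
  rw [PySem.Dict.items_counter, List.length_map]

theorem pv_check_all (s2 : List (List Int)) :
    ∀ (xs : List (List Int)) (k : Nat), k + xs.length ≤ s2.length →
    pvCheckCounts s2 (PySem.List.enumerate xs (k : Int))
      = (xs.zip (s2.drop k)).all (fun p =>
          (PySem.Set.ofList p.1).length == (PySem.Set.ofList p.2).length) := by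
  intro xs
  induction xs with
  | nil => intro k hk; simp [PySem.List.enumerate_nil, pvCheckCounts]
  | cons x rest ih =>
    intro k hk
    have hk2 : k < s2.length := by simp at hk; omega
    rw [PySem.List.enumerate_cons]
    simp only [pvCheckCounts]
    rw [PySem.List.pyGet?_natCast s2 k, List.getElem?_eq_getElem hk2]
    rw [List.drop_eq_getElem_cons hk2, List.zip_cons_cons, List.all_cons]
    simp only [Option.getD_some, pv_counter_size]
    by_cases h : (PySem.Set.ofList x).length = (PySem.Set.ofList s2[k]).length
    · have hcast : ((k : Int) + 1) = ((k + 1 : Nat) : Int) := by push_cast; ring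
      rw [hcast, ih (k + 1) (by simp at hk ⊢; omega)]
      simp [h]
    · simp [h]

theorem pv_check_false (s2 : List (List Int)) :
    ∀ (xs : List (List Int)) (k j : Nat) (hj : j < xs.length) (hs : k + j < s2.length),
    (PySem.Set.ofList xs[j]).length ≠ (PySem.Set.ofList s2[k + j]).length →
    pvCheckCounts s2 (PySem.List.enumerate xs (k : Int)) = false := by
  intro xs
  induction xs with
  | nil => intro k j hj; simp at hj
  | cons x rest ih =>
    intro k j hj hs hne
    have hk2 : k < s2.length := by omega
    rw [PySem.List.enumerate_cons]
    simp only [pvCheckCounts]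
    rw [PySem.List.pyGet?_natCast s2 k, List.getElem?_eq_getElem hk2]
    simp only [Option.getD_some, pv_counter_size]
    cases j with
    | zero =>
      have hx : (x :: rest)[0] = x := rfl
      rw [hx] at hne
      simp only [Nat.add_zero] at hne
      simp [hne]
    | succ m =>
      by_cases hh : (PySem.Set.ofList x).length = (PySem.Set.ofList s2[k]).length
      · have hcast : ((k : Int) + 1) = ((k + 1 : Nat) : Int) := by push_cast; ring
        have hm : m < rest.length := by simpa using hj
        have hrest : rest[m] = (x :: rest)[m + 1] := rfl
        have hidx : (k + 1) + m = k + (m + 1) := by omega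
        simp only [hh, beq_self_eq_true, Bool.not_true, Bool.false_eq_true, if_false]
        rw [hcast]
        refine ih (k + 1) m hm (by omega) ?_
        have he : s2[k + 1 + m]'(by omega) = s2[k + (m + 1)]'(by omega) := by
          congr 1
        rw [← he, ← hrest] at hne
        exact hne
      · simp [hh]

theorem pv_main (s1 s2 : List (List Int)) (hpre : Pre_are_same_with_ordering s1 s2) :
    are_same_with_ordering s1 s2 = are_same_with_ordering_alt s1 s2 := by
  unfold are_same_with_ordering are_same_with_ordering_alt
  cases hany : (s1.zip s2).any (fun p =>
      !((PySem.Set.ofList p.1).length == (PySem.Set.ofList p.2).length)) with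
  | true =>
    obtain ⟨p, hp, hq⟩ := List.any_eq_true.mp hany
    obtain ⟨j, hjlt, hpj⟩ := List.getElem_of_mem hp
    have hj1 : j < s1.length := by
      have := List.length_zip (l₁ := s1) (l₂ := s2)
      omega
    have hj2 : j < s2.length := by
      have := List.length_zip (l₁ := s1) (l₂ := s2)
      omega
    have hzj : (s1.zip s2)[j] = (s1[j], s2[j]) := List.getElem_zip
    have hp_eq : p = (s1[j], s2[j]) := by rw [← hpj, hzj]
    have hne : (PySem.Set.ofList s1[j]).length ≠ (PySem.Set.ofList s2[j]).length := by
      rw [hp_eq] at hq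
      simpa using hq
    have hA : pvCheckCounts s2 (PySem.List.enumerate s1 0) = false := by
      have := pv_check_false s2 s1 0 j hj1 (by omega) (by simpa using hne)
      simpa using this
    simp [hA]
  | false =>
    have hshape : s1.length ≤ s2.length := by
      rcases hpre with h | ⟨h, -⟩
      · rw [hany] at h; exact absurd h (by simp)
      · exact h
    have hall : (s1.zip s2).all (fun p =>
        (PySem.Set.ofList p.1).length == (PySem.Set.ofList p.2).length) = true := by
      rw [List.all_eq_true]
      intro p hp
      have := List.any_eq_false.mp hany p hp
      simpa using this
    have hA : pvCheckCounts s2 (PySem.List.enumerate s1 0) = true := by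
      have := pv_check_all s2 s1 0 (by omega)
      simp only [Nat.cast_zero, List.drop_zero] at this
      rw [this]
      exact hall
    have hrel0 : ∀ d ∈ [PySem.Dict.empty (κ := Int) (ν := Int)], pvRel d := by
      intro d hd
      rw [List.mem_singleton] at hd
      subst hd
      constructor <;> simp [PySem.Dict.empty, PySem.Dict.keys, PySem.Dict.values]
    have hfold := pv_fold_eq_zip s1 s2 hshape s1.length 0 [PySem.Dict.empty] (by omega)
    simp only [Nat.cast_zero, List.drop_zero] at hfold
    have hph := pv_phase2 (s1.zip s2) [PySem.Dict.empty] hrel0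
    have hinv0 : pvInv (PySem.Dict.empty (κ := Int) (ν := Int)) = PySem.Dict.empty := rfl
    have hone : ([PySem.Dict.empty (κ := Int) (ν := Int)].any
        (fun d => pvDfs (s1.zip s2) d (pvInv d)))
        = pvDfs (s1.zip s2) PySem.Dict.empty PySem.Dict.empty := by
      simp [hinv0]
    rw [hone] at hph
    simp only [hA, Bool.not_true, Bool.false_eq_true, if_false]
    rw [hfold]
    cases hB : pvDfs (s1.zip s2) PySem.Dict.empty PySem.Dict.empty with
    | true =>
      have hne : pvFoldZip (s1.zip s2) [PySem.Dict.empty] ≠ [] := hph.mpr hB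
      cases hF : pvFoldZip (s1.zip s2) [PySem.Dict.empty] with
      | nil => exact absurd hF hne
      | cons a as => simp
    | false =>
      have hFnil : pvFoldZip (s1.zip s2) [PySem.Dict.empty] = [] := by
        by_contra h
        have := hph.mp h
        rw [this] at hB
        cases hB
      simp [hFnil]

-- ===== VERDICT (by name: the statement is the Claim_ definition above) =====
theorem are_same_with_ordering_spec : Claim_equal_are_same_with_ordering := by
  unfold Claim_equal_are_same_with_ordering
  intro surface1 surface2 _ hpre
  unfold Spec_are_same_with_ordering
  exact pv_main surface1 surface2 hpre
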